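-- pv_equiv track=rewrite | github.com/katchengli/tech-interview-prep | interview_cake/ic26.py | mockReverseString
-- ===== SOURCE A (Python) =====
-- def mockReverseString(word):
--     wordList = list(word)
--     wordList2 = list(word) #suggestion de Mathieu :)
--
--     lastIx = len(wordList) - 1
--     for i in range(len(wordList)//2):
--         wordList[i], wordList[lastIx] = wordList[lastIx], wordList[i]
--         wordList2[i], wordList2[-i-1] = wordList2[-i-1], wordList2[i]
--         lastIx -= 1
--
--     return ''.join(wordList)
-- ===== SOURCE B (Python) =====
-- def mockReverseString(word):
--     return ''.join(reversed(list(word)))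
-- ===== Notes on version B (the rewrite author's own statement) =====
-- stated objective: idiomatic
-- what changed: Replaced the half-length in-place pairwise-swap loop (and the dead duplicate wordList2 bookkeeping) with a direct join of the reversed character sequence.
import Mathlib
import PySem

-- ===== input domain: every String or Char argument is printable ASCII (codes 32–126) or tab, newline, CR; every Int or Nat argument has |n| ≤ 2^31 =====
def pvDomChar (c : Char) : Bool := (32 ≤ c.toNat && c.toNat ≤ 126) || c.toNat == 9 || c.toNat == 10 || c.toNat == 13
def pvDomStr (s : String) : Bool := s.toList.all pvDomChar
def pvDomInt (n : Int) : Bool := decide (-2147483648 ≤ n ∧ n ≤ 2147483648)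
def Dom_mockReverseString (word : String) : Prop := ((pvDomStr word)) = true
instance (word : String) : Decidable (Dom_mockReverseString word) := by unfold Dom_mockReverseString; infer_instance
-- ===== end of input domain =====

-- B replaces A's half-length pairwise-swap loop (with its dead wordList2 bookkeeping)
-- by a direct join of the reversed character sequence (idiomatic; same O(n) cost).

-- ===== PORT A =====
-- one body of A's for-loop: simultaneous swaps on wordList and wordList2, then lastIx -= 1
def pvStepA (st : List Char × List Char × Int) (i : Int) : List Char × List Char × Int :=
  let wl := st.1
  let wl2 := st.2.1
  let lx := st.2.2
  let wl' := PySem.List.pySetD (PySem.List.pySetD wl i (PySem.List.pyGetD wl lx ' ')) lx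
      (PySem.List.pyGetD wl i ' ')
  let wl2' := PySem.List.pySetD (PySem.List.pySetD wl2 i (PySem.List.pyGetD wl2 (-i-1) ' ')) (-i-1)
      (PySem.List.pyGetD wl2 i ' ')
  (wl', wl2', lx - 1)

def mockReverseString (word : String) : String :=
  let wordList := word.toList
  let wordList2 := word.toList
  let lastIx : Int := (wordList.length : Int) - 1
  let st := (PySem.List.pyRange 0 (PySem.Int.floordiv (wordList.length : Int) 2) 1).foldl
      pvStepA (wordList, wordList2, lastIx)
  String.mk st.1

-- ===== PORT B =====
def mockReverseString_alt (word : String) : String :=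
  String.mk (word.toList.reverse)

-- ===== PRECONDITION & SPEC =====
def Spec_mockReverseString (word : String) (out : String) : Prop := out = mockReverseString_alt word
instance (word : String) (out : String) : Decidable (Spec_mockReverseString word out) := by unfold Spec_mockReverseString; infer_instance

-- ===== CLAIM (what is proved, stated in full; the proofs are below) =====
def Claim_equal_mockReverseString : Prop := ∀ (word : String), Dom_mockReverseString word → Spec_mockReverseString word (mockReverseString word)

-- ===== LEMMAS AND PROOFS =====

-- fold of A's loop body over the first k iteration indices
def pvG (l : List Char) (k : Nat) : List Char × List Char × Int :=
  (List.range k).foldl (fun st (i : Nat) => pvStepA st (i : Int)) (l, l, (l.length : Int) - 1)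

lemma pvG_succ (l : List Char) (k : Nat) :
    pvG l (k + 1) = pvStepA (pvG l k) (k : Int) := by
  simp [pvG, List.range_succ]

-- loop invariant: after k iterations the countdown index is n-1-k, the length is
-- preserved, and the first k and last k positions hold the reversed characters.
lemma pvG_inv (l : List Char) (k : Nat) (hk : k ≤ l.length / 2) :
    (pvG l k).1.length = l.length ∧ (pvG l k).2.2 = (l.length : Int) - 1 - k ∧
    ∀ j, j < l.length →
      (pvG l k).1[j]? =
        (if j < k ∨ l.length - 1 - k < j then l[l.length - 1 - j]? else l[j]?) := by
  induction k with
  | zero =>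
    refine ⟨rfl, by simp [pvG], ?_⟩
    intro j hj
    rw [if_neg (by omega : ¬ (j < 0 ∨ l.length - 1 - 0 < j))]
    simp [pvG]
  | succ k ih =>
    have hk' : k ≤ l.length / 2 := by omega
    obtain ⟨hlen, hlx, hget⟩ := ih hk'
    set n := l.length with hn
    have hknn : 2 * k < n := by omega
    have hk2 : k + 1 ≤ n - 1 - k := by omega
    have hlx0 : (0:Int) ≤ (n : Int) - 1 - (k:Int) := by omega
    have htoNat : ((n : Int) - 1 - (k:Int)).toNat = n - 1 - k := by omega
    have hgetk : PySem.List.pyGetD (pvG l k).1 ((k:Nat) : Int) ' ' = (l[k]?).getD ' ' := by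
      rw [PySem.List.pyGetD_natCast, List.getD_eq_getElem?_getD, hget k (by omega),
          if_neg (by omega : ¬ (k < k ∨ n - 1 - k < k))]
    have hgetl : PySem.List.pyGetD (pvG l k).1 ((n:Int) - 1 - (k:Int)) ' ' =
        (l[n - 1 - k]?).getD ' ' := by
      rw [PySem.List.pyGetD_of_nonneg _ ' ' hlx0, htoNat, List.getD_eq_getElem?_getD,
          hget (n - 1 - k) (by omega),
          if_neg (by omega : ¬ (n - 1 - k < k ∨ n - 1 - k < n - 1 - k))]
    have hwl : (pvStepA (pvG l k) (k : Int)).1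
        = ((pvG l k).1.set k ((l[n - 1 - k]?).getD ' ')).set (n - 1 - k) ((l[k]?).getD ' ') := by
      simp only [pvStepA, hlx, hgetk, hgetl, PySem.List.pySetD_natCast,
        PySem.List.pySetD_of_nonneg _ _ hlx0, htoNat]
    have hlx2 : (pvStepA (pvG l k) (k : Int)).2.2 = (n : Int) - 1 - ((k:Nat) + 1 : Nat) := by
      simp only [pvStepA, hlx]
      push_cast
      ring
    rw [pvG_succ]
    refine ⟨?_, hlx2, ?_⟩
    · rw [hwl]; simp [hlen]
    · intro j hj
      rw [hwl, List.getElem?_set, List.getElem?_set]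
      by_cases h1 : n - 1 - k = j
      · rw [if_pos h1, if_pos (by simp [hlen]; omega)]
        have hc : j < k + 1 ∨ n - 1 - (k + 1) < j := by omega
        rw [if_pos hc, show n - 1 - j = k from by omega,
            List.getElem?_eq_getElem (show k < l.length from by omega)]
        simp
      · rw [if_neg h1]
        by_cases h2 : k = j
        · subst h2
          rw [if_pos rfl, if_pos (by omega : k < (pvG l k).1.length),
              if_pos (Or.inl (by omega : k < k + 1)),
              List.getElem?_eq_getElem (show n - 1 - k < l.length from by omega)]
          simp
        · rw [if_neg h2, hget j hj]
          by_cases hc : j < k ∨ n - 1 - k < j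
          · rw [if_pos hc, if_pos (by omega : j < k + 1 ∨ n - 1 - (k + 1) < j)]
          · rw [if_neg hc, if_neg (by omega : ¬ (j < k + 1 ∨ n - 1 - (k + 1) < j))]

lemma pvG_reverse (l : List Char) : (pvG l (l.length / 2)).1 = l.reverse := by
  obtain ⟨hlen, -, hget⟩ := pvG_inv l (l.length / 2) le_rfl
  apply List.ext_getElem?
  intro j
  by_cases hj : j < l.length
  · rw [hget j hj]
    by_cases hc : j < l.length / 2 ∨ l.length - 1 - l.length / 2 < j
    · rw [if_pos hc, List.getElem?_reverse hj]
    · have hmid : l.length - 1 - j = j := by omega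
      rw [if_neg hc, List.getElem?_reverse hj, hmid]
  · rw [List.getElem?_eq_none (by omega : (pvG l (l.length / 2)).1.length ≤ j),
        List.getElem?_eq_none (by simp; omega)]

lemma pvRange_half (n : Nat) :
    PySem.List.pyRange 0 (PySem.Int.floordiv (n : Int) 2) 1
      = (List.range (n / 2)).map (Nat.cast : Nat → Int) := by
  have h2 : PySem.Int.floordiv (n : Int) 2 = ((n / 2 : Nat) : Int) := by
    exact_mod_cast PySem.Int.floordiv_natCast n 2
  rw [h2, PySem.List.pyRange_one, show (((n / 2 : Nat) : Int) - 0).toNat = n / 2 from by omega]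
  simp

lemma mockReverseString_eq (word : String) :
    mockReverseString word = String.mk word.toList.reverse := by
  simp only [mockReverseString]
  rw [pvRange_half, List.foldl_map]
  have hdef : (List.range (word.toList.length / 2)).foldl
      (fun st (y : Nat) => pvStepA st (y : Int))
      (word.toList, word.toList, (word.toList.length : Int) - 1)
      = pvG word.toList (word.toList.length / 2) := rfl
  rw [hdef]
  exact congrArg String.mk (pvG_reverse word.toList)

-- ===== VERDICT (by name: the statement is the Claim_ definition above) =====
theorem mockReverseString_spec : Claim_equal_mockReverseString := by
  intro word _
  unfold Spec_mockReverseString mockReverseString_alt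
  exact mockReverseString_eq word
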